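-- pv_equiv track=rewrite | github.com/comeonboi/algorithm-practise | loong's code/leetcode/editor/cn/1663具有给定数值的最小字符串-DESKTOP-O7485RO.py | getSmallestString
-- ===== SOURCE A (Python) =====
-- def getSmallestString(n: int, k: int) -> str:
--     # 27 怎么拆解成 3 个数字 1 + 1 + 25
--     # 73 怎么拆解成 5 个数字 1 + 1 + 19 + 26 + 26
--     def find(list_ans):
--         for i in range(n):
--             while list_ans[i] < 26:
--                 if sum(list_ans) == k:
--                     return list_ans
--                 list_ans[i] += 1
--         return list_ans
--     list1 = [1] * n
--     list1 = ''.join(list(map(lambda x:chr(x) ,map(lambda x:x+96, find(list1)))))[::-1]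
--     return list1
-- ===== SOURCE B (Python) =====
-- def getSmallestString(n: int, k: int) -> str:
--     if n <= 0:
--         return ""
--     full, rem = divmod(k - n, 25)  # trailing 'z's and the leftover for one middle letter
--     if rem == 0:
--         return 'a' * (n - full) + 'z' * full
--     return 'a' * (n - full - 1) + chr(ord('a') + rem) + 'z' * full
-- ===== Notes on version B (the rewrite author's own statement) =====
-- stated objective: alternative
-- what changed: A simulates incrementing letter values one by one (re-summing the whole list each step) until the total hits k; B computes the answer in closed form with one divmod: (k-n)//25 trailing z's, one transition letter, leading a's.
-- outside the precondition, e.g. on getSmallestString(2, 100): A returns 'zz', B returns 'xzzz'; on getSmallestString(2, 1): A returns 'zz', B returns 'aay'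
import Mathlib
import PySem

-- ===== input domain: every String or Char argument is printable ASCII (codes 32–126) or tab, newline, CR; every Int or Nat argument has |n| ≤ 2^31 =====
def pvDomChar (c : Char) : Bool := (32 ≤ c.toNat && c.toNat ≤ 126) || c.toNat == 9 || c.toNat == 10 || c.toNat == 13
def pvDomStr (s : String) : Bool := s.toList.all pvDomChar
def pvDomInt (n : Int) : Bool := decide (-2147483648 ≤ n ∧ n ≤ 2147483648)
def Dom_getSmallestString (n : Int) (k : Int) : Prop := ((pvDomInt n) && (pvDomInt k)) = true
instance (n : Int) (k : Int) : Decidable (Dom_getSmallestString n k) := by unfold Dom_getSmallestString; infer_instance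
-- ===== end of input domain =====

-- B replaces A's one-by-one increment simulation with a closed-form divmod construction.

-- ===== PORT A =====
-- inner 'while list_ans[i] < 26: if sum(...)==k: return ...; list_ans[i]+=1'.
-- .inl = early 'return list_ans' fired, .inr = while condition became false.
-- fuel 26 only makes the recursion total: list values start at 1 and grow by 1
-- towards the bound 26, so at most 25 increments happen at one index.
def aWhile (k : Int) (i : Nat) : Nat → List Int → List Int ⊕ List Int
  | 0, l => .inr l
  | fuel+1, l =>
    if l.getD i 0 < 26 then
      if l.sum = k then .inl l
      else aWhile k i fuel (l.set i (l.getD i 0 + 1))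
    else .inr l

-- 'for i in range(n): ...' with the early return propagated
def aFor (k : Int) : List Nat → List Int → List Int
  | [], l => l
  | i :: rest, l =>
    match aWhile k i 26 l with
    | .inl l' => l'
    | .inr l' => aFor k rest l'

def getSmallestString (n : Int) (k : Int) : String :=
  let list1 : List Int := List.replicate n.toNat 1       -- [1] * n (empty for n ≤ 0)
  -- indices of range(n) are all nonnegative, so Int.toNat is exact here
  let found := aFor k ((PySem.List.pyRange 0 n 1).map Int.toNat) list1
  String.ofList ((found.map (fun x => Char.ofNat (x + 96).toNat)).reverse)

-- ===== PORT B =====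
def getSmallestString_alt (n : Int) (k : Int) : String :=
  if n ≤ 0 then "" else
    let full := PySem.Int.floordiv (k - n) 25
    let rem := PySem.Int.mod (k - n) 25
    if rem = 0 then
      String.ofList (List.replicate (n - full).toNat 'a' ++ List.replicate full.toNat 'z')
    else
      String.ofList (List.replicate (n - full - 1).toNat 'a' ++
        Char.ofNat (97 + rem).toNat :: List.replicate full.toNat 'z')

-- ===== PRECONDITION & SPEC =====
-- Pre_ excludes n ≥ 1 with k outside [n, 26n]: no length-n lowercase string of numeric
-- value k exists at all, so neither program can return a correct answer; A falls through
-- its loop and happens to yield 'z'*n, B's divmod yields a different arbitrary string.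
def Pre_getSmallestString (n : Int) (k : Int) : Prop := n ≤ 0 ∨ (n ≤ k ∧ k ≤ 26 * n)
instance (n : Int) (k : Int) : Decidable (Pre_getSmallestString n k) := by
  unfold Pre_getSmallestString; infer_instance
def pvWitness_getSmallestString : Int × Int := (3, 28)

def Spec_getSmallestString (n : Int) (k : Int) (out : String) : Prop := out = getSmallestString_alt n k
instance (n : Int) (k : Int) (out : String) : Decidable (Spec_getSmallestString n k out) := by
  unfold Spec_getSmallestString; infer_instance

-- ===== CLAIM (what is proved, stated in full; the proofs are below) =====
def Claim_equal_getSmallestString : Prop := ∀ (n : Int) (k : Int), Dom_getSmallestString n k → Pre_getSmallestString n k → Spec_getSmallestString n k (getSmallestString n k)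

-- ===== LEMMAS AND PROOFS =====

theorem getD_rep (p : Nat) (v : Int) (rest : List Int) :
    (List.replicate p (26:Int) ++ v :: rest).getD p 0 = v := by
  induction p with
  | zero => simp
  | succ p ih => simp [List.replicate_succ, ih]

theorem set_rep (p : Nat) (v x : Int) (rest : List Int) :
    (List.replicate p (26:Int) ++ v :: rest).set p x = List.replicate p 26 ++ x :: rest := by
  induction p with
  | zero => simp
  | succ p ih => simp [List.replicate_succ, ih]

theorem sum_rep (p q : Nat) (v : Int) :
    (List.replicate p (26:Int) ++ v :: List.replicate q 1).sum = 26 * p + v + q := by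
  simp [List.sum_append, List.sum_replicate]
  ring

theorem aWhile_spec (k : Int) (p q : Nat) (f : Nat) (v : Int)
    (h1 : 1 ≤ v) (h2 : v ≤ 26) (hf : (27 - v).toNat ≤ f) :
    aWhile k p f (List.replicate p 26 ++ v :: List.replicate q 1) =
      if 26 * (p:Int) + v + q ≤ k ∧ k ≤ 26 * p + 25 + q then
        .inl (List.replicate p 26 ++ (k - (26 * (p:Int) + q)) :: List.replicate q 1)
      else .inr (List.replicate (p+1) 26 ++ List.replicate q 1) := by
  induction f generalizing v with
  | zero => omega
  | succ f ih =>
    rw [aWhile, getD_rep]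
    by_cases hv : v < 26
    · rw [if_pos hv, sum_rep]
      by_cases hs : 26 * (p:Int) + v + q = k
      · rw [if_pos hs, if_pos (by constructor <;> omega)]
        have : k - (26 * (p:Int) + q) = v := by omega
        rw [this]
      · rw [if_neg hs, set_rep, ih (v + 1) (by omega) (by omega) (by omega)]
        by_cases hc : 26 * (p:Int) + v + q ≤ k ∧ k ≤ 26 * p + 25 + q
        · rw [if_pos (by omega), if_pos hc]
        · rw [if_neg (by omega), if_neg hc]
    · rw [if_neg hv, if_neg (by omega)]
      have hv26 : v = 26 := by omega
      rw [hv26, List.replicate_succ' (n := p)]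
      simp

theorem aFor_spec (k : Int) (m p : Nat) :
    aFor k (List.range' p m) (List.replicate p 26 ++ List.replicate m 1) =
      if 26 * (p:Int) + m ≤ k ∧ k < 26 * ((p:Int) + m) then
        List.replicate (p + (k - (26 * (p:Int) + m)).toNat / 25) 26 ++
          (((k - (26 * (p:Int) + m)).toNat % 25 : Nat) + 1 : Int) ::
          List.replicate (m - 1 - (k - (26 * (p:Int) + m)).toNat / 25) 1
      else List.replicate (p + m) 26 := by
  induction m generalizing p with
  | zero =>
    rw [if_neg (by omega)]
    simp [aFor]
  | succ m ih =>
    rw [List.range'_succ, List.replicate_succ, aFor,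
      aWhile_spec k p m 26 1 (by omega) (by omega) (by omega)]
    by_cases hw : 26 * (p:Int) + 1 + m ≤ k ∧ k ≤ 26 * p + 25 + m
    · rw [if_pos hw]
      dsimp only
      rw [if_pos (by push_cast; constructor <;> omega)]
      have hd : (k - (26 * (p:Int) + ((m:Int)+1))).toNat / 25 = 0 := by omega
      have hm : (((k - (26 * (p:Int) + ((m:Int)+1))).toNat : Int)) % 25 + 1 = k - (26 * (p:Int) + m) := by
        omega
      push_cast
      rw [hd, hm]
      simp
    · rw [if_neg hw]
      dsimp only
      rw [ih (p+1)]
      by_cases hc : 26 * (p:Int) + ((m:Int)+1) ≤ k ∧ k < 26 * ((p:Int) + ((m:Int)+1))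
      · rw [if_pos (by push_cast; omega), if_pos (by push_cast; omega)]
        push_cast
        have e1 : p + 1 + (k - (26 * ((p:Int)+1) + m)).toNat / 25 =
            p + (k - (26 * (p:Int) + ((m:Int)+1))).toNat / 25 := by omega
        have e2 : (((k - (26 * ((p:Int)+1) + m)).toNat : Int)) % 25 =
            (((k - (26 * (p:Int) + ((m:Int)+1))).toNat : Int)) % 25 := by omega
        have e3 : m - 1 - (k - (26 * ((p:Int)+1) + m)).toNat / 25 =
            m - (k - (26 * (p:Int) + ((m:Int)+1))).toNat / 25 := by omega
        rw [e1, e2, e3]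
      · rw [if_neg (by push_cast; push_cast at hc; omega), if_neg (by push_cast; push_cast at hc; omega)]
        have : p + 1 + m = p + (m + 1) := by omega
        rw [this]

theorem range_indices (n : Int) :
    (PySem.List.pyRange 0 n 1).map Int.toNat = List.range' 0 n.toNat := by
  rw [PySem.List.pyRange_one]
  simp [List.map_map, Function.comp_def, List.range_eq_range']

-- ===== VERDICT (by name: the statement is the Claim_ definition above) =====
theorem getSmallestString_spec : Claim_equal_getSmallestString := by
  intro n k _ hpre
  unfold Spec_getSmallestString getSmallestString getSmallestString_alt
  dsimp only
  by_cases hn : n ≤ 0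
  · rw [if_pos hn]
    have h0 : n.toNat = 0 := by omega
    rw [h0, PySem.List.pyRange_one_eq_nil hn]
    rfl
  · rw [if_neg hn]
    rcases hpre with h | ⟨hk1, hk2⟩
    · omega
    set m := n.toNat with hm
    have hmn : (m : Int) = n := by omega
    have hrange : PySem.Int.floordiv (k - n) 25 = ((k - n).toNat / 25 : Nat) := by
      rw [PySem.Int.floordiv_eq_ediv_of_pos (by norm_num)]; omega
    have hmod : PySem.Int.mod (k - n) 25 = ((k - n).toNat % 25 : Nat) := by
      rw [PySem.Int.mod_eq_emod_of_pos (by norm_num)]; omega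
    rw [range_indices]
    have hstart : List.replicate m (1:Int) = List.replicate 0 26 ++ List.replicate m 1 := by simp
    rw [show List.replicate n.toNat (1:Int) = List.replicate 0 26 ++ List.replicate m 1 from hstart,
      aFor_spec k m 0, hrange, hmod]
    set r : Nat := (k - n).toNat with hr
    have hrk : (r : Int) = k - n := by omega
    by_cases hlt : k < 26 * n
    · rw [if_pos (by push_cast; omega)]
      have er : (k - (26 * ((0:Nat):Int) + m)).toNat = r := by push_cast; omega
      rw [er]
      have hjm : r / 25 < m := by omega
      by_cases hrem : ((r % 25 : Nat) : Int) = 0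
      · rw [if_pos hrem]
        have hrem0 : r % 25 = 0 := by omega
        have e1 : (n - ((r / 25 : Nat) : Int)).toNat = m - r / 25 := by omega
        have e2 : ((r / 25 : Nat) : Int).toNat = r / 25 := by omega
        rw [e1, e2]
        have hmid : Char.ofNat ((((r % 25 : Nat) : Int) + 1 + 96)).toNat = 'a' := by
          rw [hrem0]; rfl
        simp only [zero_add, List.map_append, List.map_replicate, List.map_cons,
          List.reverse_append, List.reverse_cons, List.reverse_replicate, hmid]
        have : List.replicate (m - 1 - r / 25) 'a' ++ 'a' :: List.replicate (r / 25) 'z' =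
            List.replicate (m - r / 25) 'a' ++ List.replicate (r / 25) 'z' := by
          have : m - r / 25 = (m - 1 - r / 25) + 1 := by omega
          rw [this, List.replicate_succ' (n := m - 1 - r / 25)]
          simp
        rw [← this]
        simp
      · rw [if_neg hrem]
        have e1 : (n - ((r / 25 : Nat) : Int) - 1).toNat = m - 1 - r / 25 := by omega
        have e2 : ((r / 25 : Nat) : Int).toNat = r / 25 := by omega
        rw [e1, e2]
        have hmid : Char.ofNat ((((r % 25 : Nat) : Int) + 1 + 96)).toNat =
            Char.ofNat (97 + ((r % 25 : Nat) : Int)).toNat := by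
          congr 1; omega
        simp only [zero_add, List.map_append, List.map_replicate, List.map_cons,
          List.reverse_append, List.reverse_cons, List.reverse_replicate, hmid]
        simp
    · -- k = 26 * n: all positions become 26, and B emits n 'z's
      have hk26 : k = 26 * n := by omega
      rw [if_neg (by push_cast; omega)]
      have hrem0 : r % 25 = 0 := by omega
      have : ((r % 25 : Nat) : Int) = 0 := by omega
      rw [if_pos this]
      have efull : r / 25 = m := by omega
      have e1 : (n - ((r / 25 : Nat) : Int)).toNat = 0 := by omega
      have e2 : ((r / 25 : Nat) : Int).toNat = m := by rw [efull]; omega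
      rw [e1, e2]
      simp
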